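-- pv_equiv track=rewrite | github.com/japerry911/Algorithms_and_Data_Structures | Coding_Questions/Python/MaxSubsetSumNoAdjacent.py | max_subset_sum_no_adjacent
-- ===== SOURCE A (Python) =====
-- from typing import List
--
-- def max_subset_sum_no_adjacent(array: List[int]) -> int:
--     if not len(array):
--         return 0
--
--     for i in range(len(array)):
--         if i == 0 or i == 1:
--             continue
--         array[i] += max(array[:i-1])
--
--     return max(array)
-- ===== SOURCE B (Python) =====
-- from typing import List
--
-- def max_subset_sum_no_adjacent(array: List[int]) -> int:
--     # O(n) single pass: running prefix-max of the DP values instead of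
--     # re-scanning array[:i-1] at every index.  Does not mutate the input.
--     if not array:
--         return 0
--     if len(array) == 1:
--         return array[0]
--     best = max(array[0], array[1])
--     m = array[0]       # max of dp[0..i-2]
--     prev = array[1]    # dp[i-1]
--     for v in array[2:]:
--         cur = v + m
--         best = max(best, cur)
--         m = max(m, prev)
--         prev = cur
--     return best
-- ===== Notes on version B (the rewrite author's own statement) =====
-- stated objective: faster
-- what changed: Replaced the quadratic loop that recomputes max(array[:i-1]) for every index by a single pass that maintains a running prefix-max of the DP values (and no longer mutates the input list).
import Mathlib
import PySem

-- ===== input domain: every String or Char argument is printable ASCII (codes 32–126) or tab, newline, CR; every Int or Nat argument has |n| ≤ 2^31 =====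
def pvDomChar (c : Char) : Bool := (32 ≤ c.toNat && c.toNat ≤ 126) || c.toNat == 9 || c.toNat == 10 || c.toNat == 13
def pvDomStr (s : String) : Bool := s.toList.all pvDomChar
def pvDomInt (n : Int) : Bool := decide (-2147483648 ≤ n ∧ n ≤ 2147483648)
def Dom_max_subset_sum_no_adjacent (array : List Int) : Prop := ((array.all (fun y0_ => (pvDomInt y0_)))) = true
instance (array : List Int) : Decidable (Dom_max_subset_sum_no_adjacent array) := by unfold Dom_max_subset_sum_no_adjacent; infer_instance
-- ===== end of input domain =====

-- ===== PORT A =====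
-- B replaces A's quadratic rescans of array[:i-1] by one pass with a running
-- prefix-max (objective: faster).  A mutates its argument in place in Python;
-- the equivalence proved here is about the RETURN value only (B does not mutate).
-- A's loop: for i in range(len(array)): skip i=0,1; array[i] += max(array[:i-1]).
-- Python's max is only taken on nonempty lists here (slice at i ≥ 2, array nonempty),
-- so the '.getD 0' defaults after PySem.List.max? are unreachable.
def pvStepA (a : List Int) (i : Int) : List Int :=
  if i == 0 || i == 1 then a
  else PySem.List.pySetD a i
        (PySem.List.pyGetD a i 0 +
         ((PySem.List.max? (PySem.List.slice a none (some (i - 1))) (fun x => x)).getD 0))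

def max_subset_sum_no_adjacent (array : List Int) : Int :=
  if array.length = 0 then 0
  else
    let arr := (PySem.List.pyRange 0 (array.length : Int) 1).foldl pvStepA array
    ((PySem.List.max? arr (fun x => x)).getD 0)

-- ===== PORT B =====
-- state = (best, m, prev): running answer, max of dp[0..i-2], dp[i-1]
def pvStepB (s : Int × Int × Int) (v : Int) : Int × Int × Int :=
  (max s.1 (v + s.2.1), max s.2.1 s.2.2, v + s.2.1)

def max_subset_sum_no_adjacent_alt (array : List Int) : Int :=
  match array with
  | [] => 0
  | [x] => x
  | x :: y :: rest => (rest.foldl pvStepB (max x y, x, y)).1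

-- ===== PRECONDITION & SPEC =====
def Spec_max_subset_sum_no_adjacent (array : List Int) (out : Int) : Prop := out = max_subset_sum_no_adjacent_alt array
instance (array : List Int) (out : Int) : Decidable (Spec_max_subset_sum_no_adjacent array out) := by unfold Spec_max_subset_sum_no_adjacent; infer_instance

-- ===== CLAIM (what is proved, stated in full; the proofs are below) =====
def Claim_equal_max_subset_sum_no_adjacent : Prop := ∀ (array : List Int), Dom_max_subset_sum_no_adjacent array → Spec_max_subset_sum_no_adjacent array (max_subset_sum_no_adjacent array)

-- ===== LEMMAS AND PROOFS =====

-- max of a nonempty list as Python's running max; 0 for [] (unreachable in the ports)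
def pvMx : List Int → Int
  | [] => 0
  | x :: t => t.foldl max x

-- the list of DP values A's loop writes, given m = max dp[0..i-2] and prev = dp[i-1]
def pvBuild (m prev : Int) : List Int → List Int
  | [] => []
  | v :: t => (v + m) :: pvBuild (max m prev) (v + m) t

theorem pvMx_eq_max? (l : List Int) (h : l ≠ []) :
    (PySem.List.max? l (fun x => x)).getD 0 = pvMx l := by
  cases l with
  | nil => exact absurd rfl h
  | cons x t => rw [PySem.List.max?_id_cons]; rfl

theorem pvMx_snoc (p : List Int) (z : Int) (h : p ≠ []) :
    pvMx (p ++ [z]) = max (pvMx p) z := by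
  cases p with
  | nil => exact absurd rfl h
  | cons x t => simp [pvMx, List.foldl_append]

theorem pvB_eq_mx_build (t : List Int) : ∀ (best m prev : Int),
    (t.foldl pvStepB (best, m, prev)).1 = (pvBuild m prev t).foldl max best := by
  induction t with
  | nil => intro best m prev; rfl
  | cons v t ih =>
      intro best m prev
      simp only [List.foldl_cons, pvStepB, pvBuild]
      exact ih (max best (v + m)) (max m prev) (v + m)

theorem pvSet_append (d : List Int) (v w : Int) (t : List Int) :
    (d ++ v :: t).set d.length w = d ++ w :: t := by
  induction d with
  | nil => rfl
  | cons a d ih => simp [ih]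

theorem pvGetD_append (d : List Int) (v : Int) (t : List Int) :
    (d ++ v :: t).getD d.length 0 = v := by
  induction d with
  | nil => rfl
  | cons a d ih => simp only [List.cons_append, List.length_cons, List.getD_cons_succ]; exact ih

-- loop invariant for A: processing indices d.length .. d.length + t.length - 1
theorem pvLoopA (t : List Int) : ∀ (d : List Int), 2 ≤ d.length →
    (PySem.List.pyRange (d.length : Int) ((d.length : Int) + (t.length : Int)) 1).foldl pvStepA (d ++ t)
      = d ++ pvBuild (pvMx d.dropLast) (d.getLastD 0) t := by
  induction t with
  | nil =>
      intro d hd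
      simp [PySem.List.pyRange, pvBuild]
  | cons v t ih =>
      intro d hd
      have hlt : (d.length : Int) < (d.length : Int) + ((v :: t).length : Int) := by
        simp only [List.length_cons]; push_cast; omega
      rw [PySem.List.pyRange_one_cons hlt, List.foldl_cons]
      have hstep : pvStepA (d ++ v :: t) (d.length : Int)
          = (d ++ [v + pvMx d.dropLast]) ++ t := by
        have hcond : (((d.length : Int) == 0) || ((d.length : Int) == 1)) = false := by
          simp only [Bool.or_eq_false_iff, beq_eq_false_iff_ne]
          constructor <;> (intro hcon; omega)
        have hslice : PySem.List.slice (d ++ v :: t) none (some ((d.length : Int) - 1))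
            = d.dropLast := by
          have hc : ((d.length : Int) - 1) = ((d.length - 1 : Nat) : Int) := by omega
          rw [hc, PySem.List.slice_to_natCast]
          rw [List.take_append_of_le_length (by omega)]
          rw [← List.dropLast_eq_take]
        have hne : d.dropLast ≠ [] := by
          have hl : d.dropLast.length = d.length - 1 := List.length_dropLast
          intro hcon; rw [hcon] at hl; simp at hl; omega
        unfold pvStepA
        rw [hcond, if_neg Bool.false_ne_true]
        rw [hslice, pvMx_eq_max? _ hne]
        rw [PySem.List.pySetD_natCast, PySem.List.pyGetD_natCast]
        rw [pvGetD_append, pvSet_append]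
        simp
      rw [hstep]
      have harith : (d.length : Int) + 1 = (((d ++ [v + pvMx d.dropLast]).length : Nat) : Int) := by
        simp
      have harith2 : (d.length : Int) + ((v :: t).length : Int)
          = (((d ++ [v + pvMx d.dropLast]).length : Nat) : Int) + (t.length : Int) := by
        simp; omega
      rw [harith, harith2, ih _ (by simp; omega)]
      rw [List.dropLast_concat, List.getLastD_concat]
      have hmx : pvMx d = max (pvMx d.dropLast) (d.getLastD 0) := by
        have hd0 : d ≠ [] := by intro h; rw [h] at hd; simp at hd
        conv_lhs => rw [← List.dropLast_concat_getLast (l := d) hd0]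
        rw [pvMx_snoc _ _ (by
          have hl : d.dropLast.length = d.length - 1 := List.length_dropLast
          intro hcon; rw [hcon] at hl; simp at hl; omega)]
        congr 1
        rw [List.getLastD_eq_getLast?, List.getLast?_eq_some_getLast hd0]
        rfl
      simp [pvBuild, hmx]

-- ===== VERDICT (by name: the statement is the Claim_ definition above) =====
theorem max_subset_sum_no_adjacent_spec : Claim_equal_max_subset_sum_no_adjacent := by
  unfold Claim_equal_max_subset_sum_no_adjacent
  intro array _
  unfold Spec_max_subset_sum_no_adjacent max_subset_sum_no_adjacent max_subset_sum_no_adjacent_alt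
  match array with
  | [] => rfl
  | [x] => simp [PySem.List.pyRange, pvStepA, PySem.List.max?]
  | x :: y :: rest =>
      simp only [List.length_cons]
      rw [if_neg (by omega)]
      have hrange : PySem.List.pyRange 0 ((rest.length + 1 + 1 : Nat) : Int) 1
          = 0 :: 1 :: PySem.List.pyRange (([x, y].length : Nat) : Int) ((([x,y].length : Nat) : Int) + (rest.length : Int)) 1 := by
        rw [PySem.List.pyRange_one_cons (by push_cast; omega)]
        rw [show ((0:Int) + 1) = 1 by ring, PySem.List.pyRange_one_cons (by push_cast; omega)]
        norm_num
        rw [show ((rest.length : Int) + 1 + 1) = 2 + (rest.length : Int) by ring]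
      rw [hrange]
      simp only [List.foldl_cons]
      have s0 : pvStepA (x :: y :: rest) 0 = x :: y :: rest := by simp [pvStepA]
      have s1 : pvStepA (x :: y :: rest) 1 = x :: y :: rest := by simp [pvStepA]
      rw [s0, s1]
      rw [show (x :: y :: rest) = [x, y] ++ rest from rfl, pvLoopA rest [x, y] (by simp)]
      rw [pvMx_eq_max? _ (by simp)]
      rw [show ([x,y] : List Int).dropLast = [x] from rfl,
          show ([x, y] : List Int).getLastD 0 = y from rfl,
          show pvMx ([x] : List Int) = x from rfl]
      rw [show ([x, y] ++ pvBuild x y rest) = x :: (y :: pvBuild x y rest) from rfl]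
      simp only [pvMx, List.foldl_cons]
      rw [pvB_eq_mx_build]
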